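-- pv_equiv track=rewrite | github.com/datdude5800/just | backend/server.py | detect_hash_type
-- ===== SOURCE A (Python) =====
-- def detect_hash_type(hash_value: str) -> tuple:
--     """Detect hash type based on length and characteristics"""
--     hash_clean = hash_value.strip().lower()
--     length = len(hash_clean)
--
--     possible_types = []
--     detected = "Unknown"
--
--     if length == 32 and all(c in '0123456789abcdef' for c in hash_clean):
--         possible_types = ["MD5", "NTLM"]
--         detected = "MD5"
--     elif length == 40 and all(c in '0123456789abcdef' for c in hash_clean):
--         possible_types = ["SHA-1", "RIPEMD-160"]
--         detected = "SHA-1"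
--     elif length == 56 and all(c in '0123456789abcdef' for c in hash_clean):
--         possible_types = ["SHA-224"]
--         detected = "SHA-224"
--     elif length == 64 and all(c in '0123456789abcdef' for c in hash_clean):
--         possible_types = ["SHA-256", "SHA3-256", "BLAKE2s"]
--         detected = "SHA-256"
--     elif length == 96 and all(c in '0123456789abcdef' for c in hash_clean):
--         possible_types = ["SHA-384"]
--         detected = "SHA-384"
--     elif length == 128 and all(c in '0123456789abcdef' for c in hash_clean):
--         possible_types = ["SHA-512", "SHA3-512", "BLAKE2b"]
--         detected = "SHA-512"
--     elif hash_clean.startswith('$2') and '$' in hash_clean[3:]: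
--         possible_types = ["bcrypt"]
--         detected = "bcrypt"
--     elif hash_clean.startswith('$6$'):
--         possible_types = ["SHA-512 Crypt"]
--         detected = "SHA-512 Crypt"
--     elif hash_clean.startswith('$5$'):
--         possible_types = ["SHA-256 Crypt"]
--         detected = "SHA-256 Crypt"
--     elif hash_clean.startswith('$1$'):
--         possible_types = ["MD5 Crypt"]
--         detected = "MD5 Crypt"
--     elif length == 16 and all(c in '0123456789abcdef' for c in hash_clean):
--         possible_types = ["MD5 (half)", "CRC-64"]
--         detected = "MD5 (half)"
--
--     return detected, possible_types
-- ===== SOURCE B (Python) =====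
-- def detect_hash_type(hash_value: str) -> tuple:
--     """Detect hash type in a single pass: one scan extracts the features
--     (length, all-hex flag, first three chars, '$' at index >= 3), then the
--     classification is decided from those scalars alone."""
--     hash_clean = hash_value.strip().lower()
--     n = 0
--     all_hex = True
--     dollar_late = False
--     c0 = c1 = c2 = None
--     for ch in hash_clean:
--         if n == 0:
--             c0 = ch
--         elif n == 1:
--             c1 = ch
--         elif n == 2:
--             c2 = ch
--         elif ch == '$':
--             dollar_late = True
--         if all_hex and ch not in '0123456789abcdef':
--             all_hex = False
--         n += 1
--     if all_hex:
--         for size, result in (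
--             (32, ("MD5", ["MD5", "NTLM"])),
--             (40, ("SHA-1", ["SHA-1", "RIPEMD-160"])),
--             (56, ("SHA-224", ["SHA-224"])),
--             (64, ("SHA-256", ["SHA-256", "SHA3-256", "BLAKE2s"])),
--             (96, ("SHA-384", ["SHA-384"])),
--             (128, ("SHA-512", ["SHA-512", "SHA3-512", "BLAKE2b"])),
--             (16, ("MD5 (half)", ["MD5 (half)", "CRC-64"])),
--         ):
--             if n == size:
--                 return result
--     if c0 == '$':
--         if c1 == '2' and dollar_late:
--             return "bcrypt", ["bcrypt"]
--         if c2 == '$':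
--             if c1 == '6':
--                 return "SHA-512 Crypt", ["SHA-512 Crypt"]
--             if c1 == '5':
--                 return "SHA-256 Crypt", ["SHA-256 Crypt"]
--             if c1 == '1':
--                 return "MD5 Crypt", ["MD5 Crypt"]
--     return "Unknown", []
-- ===== Notes on version B (the rewrite author's own statement) =====
-- stated objective: alternative
-- what changed: Single-pass feature extraction: one loop over the cleaned string computes length, an all-hex flag, the first three characters and whether '$' occurs at index >= 3, and the classification is then decided purely from these scalars (a length-keyed row scan for hex, character comparisons for the $-prefix formats) with no further string operations, instead of A's chain of up to six full hex rescans plus startswith/substring tests.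
import Mathlib
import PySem

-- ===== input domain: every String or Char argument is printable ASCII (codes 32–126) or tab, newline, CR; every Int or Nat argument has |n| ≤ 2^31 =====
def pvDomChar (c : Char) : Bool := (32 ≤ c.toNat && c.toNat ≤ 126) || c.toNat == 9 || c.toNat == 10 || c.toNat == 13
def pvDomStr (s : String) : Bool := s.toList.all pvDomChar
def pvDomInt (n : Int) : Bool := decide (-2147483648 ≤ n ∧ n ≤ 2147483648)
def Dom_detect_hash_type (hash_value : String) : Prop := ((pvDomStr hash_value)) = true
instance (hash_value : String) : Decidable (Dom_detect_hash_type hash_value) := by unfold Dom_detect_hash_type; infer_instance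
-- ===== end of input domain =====

-- B classifies in a single pass: one loop extracts (length, all-hex flag, first three chars,
-- '$' at index >= 3) and the verdict is then decided from those scalars alone (objective: alternative).

-- ===== PORT A =====
def detect_hash_type (hash_value : String) : String × List String :=
  let hash_clean := PySem.Str.lower (PySem.Str.strip hash_value)
  let length := PySem.Str.len hash_clean
  if length == 32 && hash_clean.toList.all (fun c => "0123456789abcdef".toList.contains c) then
    ("MD5", ["MD5", "NTLM"])
  else if length == 40 && hash_clean.toList.all (fun c => "0123456789abcdef".toList.contains c) then
    ("SHA-1", ["SHA-1", "RIPEMD-160"])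
  else if length == 56 && hash_clean.toList.all (fun c => "0123456789abcdef".toList.contains c) then
    ("SHA-224", ["SHA-224"])
  else if length == 64 && hash_clean.toList.all (fun c => "0123456789abcdef".toList.contains c) then
    ("SHA-256", ["SHA-256", "SHA3-256", "BLAKE2s"])
  else if length == 96 && hash_clean.toList.all (fun c => "0123456789abcdef".toList.contains c) then
    ("SHA-384", ["SHA-384"])
  else if length == 128 && hash_clean.toList.all (fun c => "0123456789abcdef".toList.contains c) then
    ("SHA-512", ["SHA-512", "SHA3-512", "BLAKE2b"])
  else if PySem.Str.startswith hash_clean "$2" && PySem.Str.isIn "$" (PySem.Str.slice hash_clean (some 3) none) then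
    ("bcrypt", ["bcrypt"])
  else if PySem.Str.startswith hash_clean "$6$" then
    ("SHA-512 Crypt", ["SHA-512 Crypt"])
  else if PySem.Str.startswith hash_clean "$5$" then
    ("SHA-256 Crypt", ["SHA-256 Crypt"])
  else if PySem.Str.startswith hash_clean "$1$" then
    ("MD5 Crypt", ["MD5 Crypt"])
  else if length == 16 && hash_clean.toList.all (fun c => "0123456789abcdef".toList.contains c) then
    ("MD5 (half)", ["MD5 (half)", "CRC-64"])
  else
    ("Unknown", [])

-- ===== PORT B =====
-- one step of B's feature-extraction loop (the body of 'for ch in hash_clean')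
def pvStep (st : Int × Bool × Bool × Option Char × Option Char × Option Char) (ch : Char) :
    Int × Bool × Bool × Option Char × Option Char × Option Char :=
  let (n, all_hex, dollar_late, c0, c1, c2) := st
  let (c0, c1, c2, dollar_late) :=
    if n == 0 then (some ch, c1, c2, dollar_late)
    else if n == 1 then (c0, some ch, c2, dollar_late)
    else if n == 2 then (c0, c1, some ch, dollar_late)
    else (c0, c1, c2, dollar_late || ch == '$')
  let all_hex := if all_hex && !("0123456789abcdef".toList.contains ch) then false else all_hex
  (n + 1, all_hex, dollar_late, c0, c1, c2)

-- the (size, result) rows B scans when the string is all hex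
def pvHexRows : List (Int × (String × List String)) :=
  [(32, ("MD5", ["MD5", "NTLM"])),
   (40, ("SHA-1", ["SHA-1", "RIPEMD-160"])),
   (56, ("SHA-224", ["SHA-224"])),
   (64, ("SHA-256", ["SHA-256", "SHA3-256", "BLAKE2s"])),
   (96, ("SHA-384", ["SHA-384"])),
   (128, ("SHA-512", ["SHA-512", "SHA3-512", "BLAKE2b"])),
   (16, ("MD5 (half)", ["MD5 (half)", "CRC-64"]))]

-- the fall-through tail of B: classify the $-prefix formats from the extracted features
def pvPrefixClassify (c0 c1 c2 : Option Char) (dollar_late : Bool) : String × List String :=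
  if c0 == some '$' then
    if c1 == some '2' && dollar_late then ("bcrypt", ["bcrypt"])
    else if c2 == some '$' then
      if c1 == some '6' then ("SHA-512 Crypt", ["SHA-512 Crypt"])
      else if c1 == some '5' then ("SHA-256 Crypt", ["SHA-256 Crypt"])
      else if c1 == some '1' then ("MD5 Crypt", ["MD5 Crypt"])
      else ("Unknown", [])
    else ("Unknown", [])
  else ("Unknown", [])

def detect_hash_type_alt (hash_value : String) : String × List String :=
  let hash_clean := PySem.Str.lower (PySem.Str.strip hash_value)
  let st := hash_clean.toList.foldl pvStep ((0 : Int), true, false, (none : Option Char), none, none)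
  let n := st.1
  let all_hex := st.2.1
  let dollar_late := st.2.2.1
  let c0 := st.2.2.2.1
  let c1 := st.2.2.2.2.1
  let c2 := st.2.2.2.2.2
  if all_hex then
    match pvHexRows.find? (fun row => row.1 == n) with
    | some row => row.2
    | none => pvPrefixClassify c0 c1 c2 dollar_late
  else pvPrefixClassify c0 c1 c2 dollar_late

-- ===== PRECONDITION & SPEC =====
def Spec_detect_hash_type (hash_value : String) (out : String × List String) : Prop := out = detect_hash_type_alt hash_value
instance (hash_value : String) (out : String × List String) : Decidable (Spec_detect_hash_type hash_value out) := by unfold Spec_detect_hash_type; infer_instance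

-- ===== CLAIM =====
def Claim_equal_detect_hash_type : Prop := ∀ (hash_value : String), Dom_detect_hash_type hash_value → Spec_detect_hash_type hash_value (detect_hash_type hash_value)

-- ===== LEMMAS AND PROOFS =====

-- B's hex-flag update 'if all_hex and ch not in hex: all_hex = False' is a Boolean and
theorem ite_hex (ah c : Bool) : (if ah && !c then false else ah) = (ah && c) := by
  cases ah <;> cases c <;> rfl

theorem pvStep_zero (ah dl : Bool) (c0 c1 c2 : Option Char) (ch : Char) :
    pvStep (0, ah, dl, c0, c1, c2) ch =
      (1, ah && "0123456789abcdef".toList.contains ch, dl, some ch, c1, c2) := by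
  simp only [pvStep, ite_hex]; rfl

theorem pvStep_one (ah dl : Bool) (c0 c1 c2 : Option Char) (ch : Char) :
    pvStep (1, ah, dl, c0, c1, c2) ch =
      (2, ah && "0123456789abcdef".toList.contains ch, dl, c0, some ch, c2) := by
  simp only [pvStep, ite_hex]; rfl

theorem pvStep_two (ah dl : Bool) (c0 c1 c2 : Option Char) (ch : Char) :
    pvStep (2, ah, dl, c0, c1, c2) ch =
      (3, ah && "0123456789abcdef".toList.contains ch, dl, c0, c1, some ch) := by
  simp only [pvStep, ite_hex]; rfl

-- once the index is ≥ 3, B's loop only accumulates length, the hex flag and the late-'$' flag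
theorem pvScan_ge3 (l : List Char) (k : Int) (hk : 3 ≤ k) (ah dl : Bool) (c0 c1 c2 : Option Char) :
    l.foldl pvStep (k, ah, dl, c0, c1, c2) =
      (k + l.length, ah && l.all (fun c => "0123456789abcdef".toList.contains c),
       dl || l.contains '$', c0, c1, c2) := by
  induction l generalizing k ah dl with
  | nil => simp
  | cons ch r ih =>
    have h0 : (k == 0) = false := by simp; omega
    have h1 : (k == 1) = false := by simp; omega
    have h2 : (k == 2) = false := by simp; omega
    have hstep : pvStep (k, ah, dl, c0, c1, c2) ch =
        (k + 1, ah && "0123456789abcdef".toList.contains ch, dl || ch == '$', c0, c1, c2) := by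
      simp only [pvStep, h0, h1, h2, Bool.false_eq_true, if_false, ite_hex]
    rw [List.foldl_cons, hstep, ih (k + 1) (by omega)]
    have hcomm : ('$' == ch) = (ch == '$') := Bool.beq_comm
    simp only [List.all_cons, List.contains_cons, List.length_cons, Prod.mk.injEq, hcomm,
      Bool.and_assoc, Bool.or_assoc, and_true]
    push_cast; ring

-- what B's single pass computes, in closed form
theorem pvScan_eq (l : List Char) :
    l.foldl pvStep ((0 : Int), true, false, (none : Option Char), none, none) =
      ((l.length : Int), l.all (fun c => "0123456789abcdef".toList.contains c),
       (l.drop 3).contains '$', l[0]?, l[1]?, l[2]?) := by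
  match l with
  | [] => rfl
  | [a] =>
      rw [show List.foldl pvStep ((0 : Int), true, false, (none : Option Char), none, none) [a] =
        pvStep ((0 : Int), true, false, (none : Option Char), none, none) a from rfl, pvStep_zero]
      simp
  | [a, b] =>
      rw [show List.foldl pvStep ((0 : Int), true, false, (none : Option Char), none, none) [a, b] =
        pvStep (pvStep ((0 : Int), true, false, (none : Option Char), none, none) a) b from rfl,
        pvStep_zero, pvStep_one]
      simp
  | a :: b :: c :: r =>
      rw [show List.foldl pvStep ((0 : Int), true, false, (none : Option Char), none, none) (a :: b :: c :: r) =
        List.foldl pvStep (pvStep (pvStep (pvStep ((0 : Int), true, false, (none : Option Char), none, none) a) b) c) r from rfl,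
        pvStep_zero, pvStep_one, pvStep_two, pvScan_ge3 r 3 (by norm_num)]
      simp only [List.all_cons, List.length_cons, List.drop_succ_cons, List.drop_zero,
        List.getElem?_cons_zero, List.getElem?_cons_succ, Prod.mk.injEq, Bool.true_and,
        Bool.false_or, Bool.and_assoc, and_true]
      push_cast; ring

-- a two-character startswith is a pair of indexed-character tests
theorem sw2 (l : List Char) (x y : Char) :
    PySem.Chars.startswith l [x, y] = (l[0]? == some x && l[1]? == some y) := by
  match l with
  | [] => rfl
  | [a] => simp [PySem.Chars.startswith, List.isPrefixOf]
  | a :: b :: r => simp [PySem.Chars.startswith, List.isPrefixOf, Bool.beq_comm]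

-- a three-character startswith is a triple of indexed-character tests
theorem sw3 (l : List Char) (x y z : Char) :
    PySem.Chars.startswith l [x, y, z] = (l[0]? == some x && (l[1]? == some y && l[2]? == some z)) := by
  match l with
  | [] => rfl
  | [a] => simp [PySem.Chars.startswith, List.isPrefixOf]
  | [a, b] => simp [PySem.Chars.startswith, List.isPrefixOf]
  | a :: b :: c :: r => simp [PySem.Chars.startswith, List.isPrefixOf, Bool.beq_comm]

-- 'sub in s' for a one-character sub is list membership
theorem isIn_singleton (c : Char) (t : List Char) : PySem.Chars.isIn [c] t = t.contains c := by
  rw [Bool.eq_iff_iff, PySem.Chars.isIn_iff_infix, List.singleton_infix_iff, List.contains_iff_mem]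

-- A's '$' in hash_clean[3:] is exactly the drop-3 membership B's flag records
theorem isIn_slice3 (s : String) :
    PySem.Str.isIn "$" (PySem.Str.slice s (some 3) none) = (s.toList.drop 3).contains '$' := by
  have h3 : PySem.List.slice s.toList (some 3) none = s.toList.drop 3 := by
    rw [PySem.List.slice_from s.toList (by norm_num : (0:Int) ≤ 3)]; rfl
  simp [isIn_singleton, h3]

theorem str_sw2 (s : String) :
    PySem.Str.startswith s "$2" = (s.toList[0]? == some '$' && s.toList[1]? == some '2') := by
  rw [PySem.Str.startswith_eq, show ("$2" : String).toList = ['$', '2'] from rfl, sw2]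

theorem str_sw6 (s : String) :
    PySem.Str.startswith s "$6$" = (s.toList[0]? == some '$' && (s.toList[1]? == some '6' && s.toList[2]? == some '$')) := by
  rw [PySem.Str.startswith_eq, show ("$6$" : String).toList = ['$', '6', '$'] from rfl, sw3]

theorem str_sw5 (s : String) :
    PySem.Str.startswith s "$5$" = (s.toList[0]? == some '$' && (s.toList[1]? == some '5' && s.toList[2]? == some '$')) := by
  rw [PySem.Str.startswith_eq, show ("$5$" : String).toList = ['$', '5', '$'] from rfl, sw3]

theorem str_sw1 (s : String) :
    PySem.Str.startswith s "$1$" = (s.toList[0]? == some '$' && (s.toList[1]? == some '1' && s.toList[2]? == some '$')) := by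
  rw [PySem.Str.startswith_eq, show ("$1$" : String).toList = ['$', '1', '$'] from rfl, sw3]

-- an all-hex string cannot start with '$'
theorem hex_head (l : List Char)
    (h : l.all (fun c => "0123456789abcdef".toList.contains c) = true) :
    (l[0]? == some '$') = false := by
  match l with
  | [] => rfl
  | a :: r =>
    have ha := (List.all_eq_true.mp h) a (by simp)
    simp only [List.getElem?_cons_zero]
    by_contra hb
    rw [Bool.not_eq_false, beq_iff_eq, Option.some_inj] at hb
    subst hb
    simp at ha

-- A's body applied to the cleaned string (definitionally the body of detect_hash_type)
def pvABody (s : String) : String × List String :=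
  if PySem.Str.len s == 32 && s.toList.all (fun c => "0123456789abcdef".toList.contains c) then
    ("MD5", ["MD5", "NTLM"])
  else if PySem.Str.len s == 40 && s.toList.all (fun c => "0123456789abcdef".toList.contains c) then
    ("SHA-1", ["SHA-1", "RIPEMD-160"])
  else if PySem.Str.len s == 56 && s.toList.all (fun c => "0123456789abcdef".toList.contains c) then
    ("SHA-224", ["SHA-224"])
  else if PySem.Str.len s == 64 && s.toList.all (fun c => "0123456789abcdef".toList.contains c) then
    ("SHA-256", ["SHA-256", "SHA3-256", "BLAKE2s"])
  else if PySem.Str.len s == 96 && s.toList.all (fun c => "0123456789abcdef".toList.contains c) then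
    ("SHA-384", ["SHA-384"])
  else if PySem.Str.len s == 128 && s.toList.all (fun c => "0123456789abcdef".toList.contains c) then
    ("SHA-512", ["SHA-512", "SHA3-512", "BLAKE2b"])
  else if PySem.Str.startswith s "$2" && PySem.Str.isIn "$" (PySem.Str.slice s (some 3) none) then
    ("bcrypt", ["bcrypt"])
  else if PySem.Str.startswith s "$6$" then
    ("SHA-512 Crypt", ["SHA-512 Crypt"])
  else if PySem.Str.startswith s "$5$" then
    ("SHA-256 Crypt", ["SHA-256 Crypt"])
  else if PySem.Str.startswith s "$1$" then
    ("MD5 Crypt", ["MD5 Crypt"])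
  else if PySem.Str.len s == 16 && s.toList.all (fun c => "0123456789abcdef".toList.contains c) then
    ("MD5 (half)", ["MD5 (half)", "CRC-64"])
  else
    ("Unknown", [])

-- B's classification step on the scanned feature tuple (definitionally the tail of detect_hash_type_alt)
def pvClassify (st : Int × Bool × Bool × Option Char × Option Char × Option Char) : String × List String :=
  if st.2.1 then
    match pvHexRows.find? (fun row => row.1 == st.1) with
    | some row => row.2
    | none => pvPrefixClassify st.2.2.2.1 st.2.2.2.2.1 st.2.2.2.2.2 st.2.2.1
  else pvPrefixClassify st.2.2.2.1 st.2.2.2.2.1 st.2.2.2.2.2 st.2.2.1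

-- the heart of the proof: A's chain equals B's feature classification on any cleaned string
theorem pvBody_eq (s : String) :
    pvABody s = pvClassify ((s.toList.length : Int),
      s.toList.all (fun c => "0123456789abcdef".toList.contains c),
      (s.toList.drop 3).contains '$', s.toList[0]?, s.toList[1]?, s.toList[2]?) := by
  unfold pvABody pvClassify
  dsimp only
  by_cases hhex : s.toList.all (fun c => "0123456789abcdef".toList.contains c) = true
  · have h0 := hex_head s.toList hhex
    have hb2 : PySem.Str.startswith s "$2" = false := by rw [str_sw2, h0, Bool.false_and]
    have hb6 : PySem.Str.startswith s "$6$" = false := by rw [str_sw6, h0, Bool.false_and]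
    have hb5 : PySem.Str.startswith s "$5$" = false := by rw [str_sw5, h0, Bool.false_and]
    have hb1 : PySem.Str.startswith s "$1$" = false := by rw [str_sw1, h0, Bool.false_and]
    simp only [PySem.Str.len_eq, hhex, Bool.and_true, hb2, hb6, hb5, hb1, Bool.false_and,
      Bool.false_eq_true, if_false]
    by_cases h32 : s.toList.length = 32
    · simp [h32, pvHexRows]
    · by_cases h40 : s.toList.length = 40
      · simp [h40, pvHexRows]
      · by_cases h56 : s.toList.length = 56
        · simp [h56, pvHexRows]
        · by_cases h64 : s.toList.length = 64
          · simp [h64, pvHexRows]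
          · by_cases h96 : s.toList.length = 96
            · simp [h96, pvHexRows]
            · by_cases h128 : s.toList.length = 128
              · simp [h128, pvHexRows]
              · by_cases h16 : s.toList.length = 16
                · simp [h16, pvHexRows, h32, h40, h56, h64, h96, h128]
                · have e : s.toList.length = s.length := by simp
                  rw [e] at h32 h40 h56 h64 h96 h128 h16
                  have p32 : ¬((s.length : Int) = (32 : Int)) := by omega
                  have b32 : ((32 : Int) == (s.length : Int)) = false := by
                    rw [beq_eq_false_iff_ne]; omega
                  have p40 : ¬((s.length : Int) = (40 : Int)) := by omega
                  have b40 : ((40 : Int) == (s.length : Int)) = false := by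
                    rw [beq_eq_false_iff_ne]; omega
                  have p56 : ¬((s.length : Int) = (56 : Int)) := by omega
                  have b56 : ((56 : Int) == (s.length : Int)) = false := by
                    rw [beq_eq_false_iff_ne]; omega
                  have p64 : ¬((s.length : Int) = (64 : Int)) := by omega
                  have b64 : ((64 : Int) == (s.length : Int)) = false := by
                    rw [beq_eq_false_iff_ne]; omega
                  have p96 : ¬((s.length : Int) = (96 : Int)) := by omega
                  have b96 : ((96 : Int) == (s.length : Int)) = false := by
                    rw [beq_eq_false_iff_ne]; omega
                  have p128 : ¬((s.length : Int) = (128 : Int)) := by omega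
                  have b128 : ((128 : Int) == (s.length : Int)) = false := by
                    rw [beq_eq_false_iff_ne]; omega
                  have p16 : ¬((s.length : Int) = (16 : Int)) := by omega
                  have b16 : ((16 : Int) == (s.length : Int)) = false := by
                    rw [beq_eq_false_iff_ne]; omega
                  simp [pvHexRows, List.find?, p32, p40, p56, p64, p96, p128, p16,
                    b32, b40, b56, b64, b96, b128, b16, pvPrefixClassify, h0]
  · have hhex' : s.toList.all (fun c => "0123456789abcdef".toList.contains c) = false := by
      simpa using hhex
    simp only [hhex', Bool.and_false, Bool.false_eq_true, if_false]
    rw [str_sw2, str_sw6, str_sw5, str_sw1, isIn_slice3]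
    cases h0 : (s.toList[0]? == some '$') <;>
    cases h2 : (s.toList[1]? == some '2') <;>
    cases hdl : (s.toList.drop 3).contains '$' <;>
    cases hd2 : (s.toList[2]? == some '$') <;>
    cases h6 : (s.toList[1]? == some '6') <;>
    cases h5 : (s.toList[1]? == some '5') <;>
    cases h1 : (s.toList[1]? == some '1') <;>
    simp [pvPrefixClassify, h0, h2, hdl, hd2, h6, h5, h1]

-- ===== VERDICT =====
theorem detect_hash_type_spec : Claim_equal_detect_hash_type := by
  intro hash_value _
  unfold Spec_detect_hash_type
  have hA : detect_hash_type hash_value = pvABody (PySem.Str.lower (PySem.Str.strip hash_value)) := rfl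
  have hB : detect_hash_type_alt hash_value =
      pvClassify ((PySem.Str.lower (PySem.Str.strip hash_value)).toList.foldl pvStep
        ((0 : Int), true, false, (none : Option Char), none, none)) := rfl
  rw [hA, hB, pvScan_eq]
  exact pvBody_eq _
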